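-- pv_equiv track=rewrite | github.com/hikowong/taxomanie | phylocore-1.0/phylocore/app/djangophylocore/lib/phylogelib.py | removeBootStraps
-- ===== SOURCE A (Python) =====
-- def removeBootStraps(tree):
--   """ Remove all bootstraps from tree """
--   chaine = ""
--   ignore = False
--   for i in range(len(tree)):
--     if tree[i] == ":":
--       ignore = True
--     if tree[i] == "," or tree[i] == ")":
--       ignore = False
--     if i > 0 and tree[i-1] == ')' and tree[i] not in "),":
--       ignore = True
--     if not ignore:
--       chaine += tree[i]
--   return chaine
-- ===== SOURCE B (Python) =====
-- import re
--
-- def removeBootStraps(tree):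
--   """ Remove all bootstraps from tree """
--   tree = re.sub(r'\)[^,)]*', ')', tree)
--   return re.sub(r':[^,)]*', '', tree)
-- ===== Notes on version B (the rewrite author's own statement) =====
-- stated objective: faster
-- what changed: Replaced the per-character ignore-flag state machine (with quadratic string concatenation) by two regular-expression substitutions: one that keeps each closing parenthesis but deletes the following run up to the next delimiter, then one that deletes each colon together with the run after it.
import Mathlib
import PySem

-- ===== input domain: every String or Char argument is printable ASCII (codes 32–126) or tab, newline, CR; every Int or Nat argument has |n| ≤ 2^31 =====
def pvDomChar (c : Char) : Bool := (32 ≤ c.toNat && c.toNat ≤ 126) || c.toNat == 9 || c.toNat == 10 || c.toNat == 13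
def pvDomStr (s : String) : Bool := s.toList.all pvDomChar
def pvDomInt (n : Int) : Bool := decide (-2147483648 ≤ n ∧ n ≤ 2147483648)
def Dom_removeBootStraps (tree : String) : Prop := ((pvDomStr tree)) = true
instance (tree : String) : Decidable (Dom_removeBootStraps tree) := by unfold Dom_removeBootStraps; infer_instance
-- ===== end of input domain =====

-- B replaces A's per-character ignore-flag state machine (quadratic string concatenation) with two linear regex substitutions; the return value is proved equal.

-- ===== PORT A =====
-- A's loop over i in range(len(tree)): state = (previous char as Option Char, ignore flag, accumulated chaine)
def rbGo (prev : Option Char) (ignore : Bool) (cs : List Char) (acc : List Char) : List Char :=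
  match cs with
  | [] => acc
  | c :: rest =>
    let i1 := if c = ':' then true else ignore
    let i2 := if c = ',' ∨ c = ')' then false else i1
    let i3 := if prev = some ')' ∧ ¬(c = ')' ∨ c = ',') then true else i2
    let acc' := if ¬ i3 then acc ++ [c] else acc
    rbGo (some c) i3 rest acc'

def removeBootStraps (tree : String) : String :=
  String.ofList (rbGo none false tree.toList [])

-- ===== PORT B =====
-- hand port of re.sub(r'\)[^,)]*', ')', tree): exact — after each ')' (which is kept),
-- the greedy run of characters not in ",)" is deleted; b tracks being inside such a run.
def rbPass1 (b : Bool) (cs : List Char) : List Char :=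
  match cs with
  | [] => []
  | c :: r =>
    if c = ')' then ')' :: rbPass1 true r
    else if c = ',' then ',' :: rbPass1 false r
    else if b then rbPass1 true r
    else c :: rbPass1 false r

-- hand port of re.sub(r':[^,)]*', '', tree): exact — each ':' and the greedy run of
-- characters not in ",)" after it are deleted; b tracks being inside such a run.
def rbPass2 (b : Bool) (cs : List Char) : List Char :=
  match cs with
  | [] => []
  | c :: r =>
    if c = ':' then rbPass2 true r
    else if c = ',' ∨ c = ')' then c :: rbPass2 false r
    else if b then rbPass2 true r
    else c :: rbPass2 false r

def removeBootStraps_alt (tree : String) : String :=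
  String.ofList (rbPass2 false (rbPass1 false tree.toList))

-- ===== PRECONDITION & SPEC =====
def Spec_removeBootStraps (tree : String) (out : String) : Prop := out = removeBootStraps_alt tree
instance (tree : String) (out : String) : Decidable (Spec_removeBootStraps tree out) := by unfold Spec_removeBootStraps; infer_instance

-- ===== CLAIM (what is proved, stated in full; the proofs are below) =====
def Claim_equal_removeBootStraps : Prop := ∀ (tree : String), Dom_removeBootStraps tree → Spec_removeBootStraps tree (removeBootStraps tree)

-- ===== LEMMAS AND PROOFS =====

-- State correspondence: A's (prev, ignore) vs pass1's b1 and pass2's b2.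
def rbRel (prev : Option Char) (i b1 b2 : Bool) : Prop :=
  (b1 = false → prev ≠ some ')' ∧ i = b2) ∧
  (b1 = true → b2 = false ∧ (prev ≠ some ')' → i = true))

theorem rbMain : ∀ (cs : List Char) (prev : Option Char) (i b1 b2 : Bool) (acc : List Char),
    rbRel prev i b1 b2 →
    rbGo prev i cs acc = acc ++ rbPass2 b2 (rbPass1 b1 cs) := by
  intro cs
  induction cs with
  | nil => intro prev i b1 b2 acc _; simp [rbGo, rbPass1, rbPass2]
  | cons c r ih =>
    intro prev i b1 b2 acc hR
    obtain ⟨h0, h1⟩ := hR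
    by_cases hc1 : c = ')'
    · subst hc1
      have hstep : rbGo prev i (')' :: r) acc = rbGo (some ')') false r (acc ++ [')']) := by
        simp [rbGo]
      rw [hstep, ih _ _ true false (acc ++ [')']) (by constructor <;> simp)]
      simp [rbPass1, rbPass2]
    · by_cases hc2 : c = ','
      · subst hc2
        have hstep : rbGo prev i (',' :: r) acc = rbGo (some ',') false r (acc ++ [',']) := by
          simp [rbGo]
        rw [hstep, ih _ _ false false (acc ++ [',']) (by constructor <;> simp)]
        simp [rbPass1, rbPass2]
      · -- c is neither ')' nor ','
        cases b1 with
        | true =>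
          -- inside a pass1 skip region: b2 = false, and ignore holds (or prev = ')', which sets it)
          obtain ⟨hb2, hi⟩ := h1 rfl
          subst hb2
          have hign : (if prev = some ')' ∧ ¬(c = ')' ∨ c = ',') then true
              else if c = ',' ∨ c = ')' then false else if c = ':' then true else i) = true := by
            by_cases hp : prev = some ')'
            · simp [hp, hc1, hc2]
            · by_cases hcol : c = ':'
              · simp [hcol]
              · simp [hp, hc1, hc2, hcol, hi hp]
          have hstep : rbGo prev i (c :: r) acc = rbGo (some c) true r acc := by
            simp only [rbGo, hign]
            simp
          rw [hstep, ih _ _ true false acc (by constructor <;> simp_all)]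
          by_cases hcol : c = ':'
          · simp [rbPass1, hcol]
          · simp [rbPass1, hc1, hc2]
        | false =>
          obtain ⟨hp, hib⟩ := h0 rfl
          subst hib
          by_cases hcol : c = ':'
          · subst hcol
            have hstep : rbGo prev i (':' :: r) acc = rbGo (some ':') true r acc := by
              simp [rbGo, hp]
            rw [hstep, ih _ _ false true acc (by constructor <;> simp)]
            simp [rbPass1, rbPass2, hc1, hc2]
          · -- ordinary char: kept iff ¬ i (= pass2's skip state)
            have hign : (if prev = some ')' ∧ ¬(c = ')' ∨ c = ',') then true
                else if c = ',' ∨ c = ')' then false else if c = ':' then true else i) = i := by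
              simp [hp, hc1, hc2, hcol]
            have hstep : rbGo prev i (c :: r) acc
                = rbGo (some c) i r (if ¬ i then acc ++ [c] else acc) := by
              simp only [rbGo, hign]
            rw [hstep, ih _ _ false i _ (by constructor <;> simp_all)]
            cases i with
            | true => simp [rbPass1, rbPass2, hc1, hc2, hcol]
            | false => simp [rbPass1, rbPass2, hc1, hc2, hcol]

-- ===== VERDICT (by name: the statement is the Claim_ definition above) =====
theorem removeBootStraps_spec : Claim_equal_removeBootStraps := by
  intro tree _
  unfold Spec_removeBootStraps removeBootStraps removeBootStraps_alt
  rw [rbMain tree.toList none false false false [] (by constructor <;> simp)]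
  simp
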